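-- pv_equiv track=rewrite | github.com/Ontic-Labs/kyokan | scripts/build-ingredient-ontology.py | derive_modifiers
-- ===== SOURCE A (Python) =====
-- from typing import List, Dict, Any, Optional, Set
--
-- COLOR_WORDS = {"red", "green", "yellow", "orange", "purple", "white", "black", "brown", "golden"}
--
-- FORM_WORDS = {"raw", "cooked", "dried", "ground", "fresh", "frozen", "canned", "whole", "powdered"}
--
-- PREP_WORDS = {
--     "chopped", "diced", "minced", "sliced", "shredded", "peeled", "seeded",
--     "grated", "crushed", "roasted", "toasted", "smoked", "blanched", "sauteed",
--     "melted", "softened", "julienned", "cubed", "mashed", "pureed",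
-- }
--
-- SIZE_WORDS = {"small", "medium", "large", "thin", "thick", "baby", "mini"}
--
-- def derive_modifiers(tokens: List[str]) -> Dict[str, List[str]]:
--     return {
--         "color": [t for t in tokens if t in COLOR_WORDS],
--         "form": [t for t in tokens if t in FORM_WORDS],
--         "prep": [t for t in tokens if t in PREP_WORDS],
--         "size": [t for t in tokens if t in SIZE_WORDS],
--         "origin": [],
--     }
-- ===== SOURCE B (Python) =====
-- _CATEGORY = {
--     "red": "color", "green": "color", "yellow": "color", "orange": "color",
--     "purple": "color", "white": "color", "black": "color", "brown": "color",
--     "golden": "color",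
--     "raw": "form", "cooked": "form", "dried": "form", "ground": "form",
--     "fresh": "form", "frozen": "form", "canned": "form", "whole": "form",
--     "powdered": "form",
--     "chopped": "prep", "diced": "prep", "minced": "prep", "sliced": "prep",
--     "shredded": "prep", "peeled": "prep", "seeded": "prep", "grated": "prep",
--     "crushed": "prep", "roasted": "prep", "toasted": "prep", "smoked": "prep",
--     "blanched": "prep", "sauteed": "prep", "melted": "prep", "softened": "prep",
--     "julienned": "prep", "cubed": "prep", "mashed": "prep", "pureed": "prep",
--     "small": "size", "medium": "size", "large": "size", "thin": "size",
--     "thick": "size", "baby": "size", "mini": "size",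
-- }
--
-- def derive_modifiers(tokens):
--     result = {"color": [], "form": [], "prep": [], "size": [], "origin": []}
--     for t in tokens:
--         cat = _CATEGORY.get(t)
--         if cat is not None:
--             result[cat].append(t)
--     return result
-- ===== Notes on version B (the rewrite author's own statement) =====
-- stated objective: faster
-- what changed: Replaced the four separate comprehension passes (one membership filter per category) with one reverse-lookup table word->category and a single pass over tokens appending each hit to its bucket.
import Mathlib
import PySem

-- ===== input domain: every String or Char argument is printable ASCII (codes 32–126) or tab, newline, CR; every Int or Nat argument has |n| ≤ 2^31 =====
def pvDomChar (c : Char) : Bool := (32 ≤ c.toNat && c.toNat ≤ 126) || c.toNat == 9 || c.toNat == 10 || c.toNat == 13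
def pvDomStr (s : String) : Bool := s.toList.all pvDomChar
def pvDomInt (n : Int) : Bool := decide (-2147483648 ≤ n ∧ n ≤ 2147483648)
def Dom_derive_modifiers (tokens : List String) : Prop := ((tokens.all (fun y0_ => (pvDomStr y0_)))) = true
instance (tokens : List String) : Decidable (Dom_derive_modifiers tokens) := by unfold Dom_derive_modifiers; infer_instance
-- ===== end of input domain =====

-- B replaces A's four per-category membership filters by one word->category reverse table and a single pass; same output.

-- ===== PORT A =====
def COLOR_WORDS : PySem.Set String := PySem.Set.ofList
  ["red", "green", "yellow", "orange", "purple", "white", "black", "brown", "golden"]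
def FORM_WORDS : PySem.Set String := PySem.Set.ofList
  ["raw", "cooked", "dried", "ground", "fresh", "frozen", "canned", "whole", "powdered"]
def PREP_WORDS : PySem.Set String := PySem.Set.ofList
  ["chopped", "diced", "minced", "sliced", "shredded", "peeled", "seeded",
   "grated", "crushed", "roasted", "toasted", "smoked", "blanched", "sauteed",
   "melted", "softened", "julienned", "cubed", "mashed", "pureed"]
def SIZE_WORDS : PySem.Set String := PySem.Set.ofList
  ["small", "medium", "large", "thin", "thick", "baby", "mini"]

def derive_modifiers (tokens : List String) : List (String × List String) :=
  [("color", tokens.filter (fun t => PySem.Set.contains COLOR_WORDS t)),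
   ("form",  tokens.filter (fun t => PySem.Set.contains FORM_WORDS t)),
   ("prep",  tokens.filter (fun t => PySem.Set.contains PREP_WORDS t)),
   ("size",  tokens.filter (fun t => PySem.Set.contains SIZE_WORDS t)),
   ("origin", [])]

-- ===== PORT B =====
def catTable : PySem.Dict String String := PySem.Dict.mk
  [("red", "color"), ("green", "color"), ("yellow", "color"), ("orange", "color"),
   ("purple", "color"), ("white", "color"), ("black", "color"), ("brown", "color"),
   ("golden", "color"),
   ("raw", "form"), ("cooked", "form"), ("dried", "form"), ("ground", "form"),
   ("fresh", "form"), ("frozen", "form"), ("canned", "form"), ("whole", "form"),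
   ("powdered", "form"),
   ("chopped", "prep"), ("diced", "prep"), ("minced", "prep"), ("sliced", "prep"),
   ("shredded", "prep"), ("peeled", "prep"), ("seeded", "prep"), ("grated", "prep"),
   ("crushed", "prep"), ("roasted", "prep"), ("toasted", "prep"), ("smoked", "prep"),
   ("blanched", "prep"), ("sauteed", "prep"), ("melted", "prep"), ("softened", "prep"),
   ("julienned", "prep"), ("cubed", "prep"), ("mashed", "prep"), ("pureed", "prep"),
   ("small", "size"), ("medium", "size"), ("large", "size"), ("thin", "size"),
   ("thick", "size"), ("baby", "size"), ("mini", "size")]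

def derive_modifiers_alt (tokens : List String) : List (String × List String) :=
  (tokens.foldl
    (fun r t =>
      match catTable.get? t with
      | some cat => r.modify cat [] (fun l => l ++ [t])
      | none => r)
    (PySem.Dict.mk
      [("color", []), ("form", []), ("prep", []), ("size", []), ("origin", ([] : List String))])).items

-- ===== PRECONDITION & SPEC =====
def Spec_derive_modifiers (tokens : List String) (out : List (String × List String)) : Prop := out = derive_modifiers_alt tokens
instance (tokens : List String) (out : List (String × List String)) : Decidable (Spec_derive_modifiers tokens out) := by unfold Spec_derive_modifiers; infer_instance

-- ===== CLAIM (what is proved, stated in full; the proofs are below) =====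
def Claim_equal_derive_modifiers : Prop := ∀ (tokens : List String), Dom_derive_modifiers tokens → Spec_derive_modifiers tokens (derive_modifiers tokens)

-- ===== LEMMAS AND PROOFS =====

-- the reverse table looks a token up exactly as A's four membership tests do, in order
set_option maxHeartbeats 2000000 in
set_option maxRecDepth 10000 in
theorem cat_lookup (t : String) :
    catTable.get? t =
      if t ∈ COLOR_WORDS then some "color"
      else if t ∈ FORM_WORDS then some "form"
      else if t ∈ PREP_WORDS then some "prep"
      else if t ∈ SIZE_WORDS then some "size"
      else none := by
  by_cases h1 : t ∈ COLOR_WORDS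
  · rw [show COLOR_WORDS = ["red", "green", "yellow", "orange", "purple", "white", "black", "brown", "golden"] from by decide] at h1
    simp only [List.mem_cons, List.not_mem_nil, or_false] at h1
    rcases h1 with rfl|rfl|rfl|rfl|rfl|rfl|rfl|rfl|rfl <;> decide
  · by_cases h2 : t ∈ FORM_WORDS
    · rw [show FORM_WORDS = ["raw", "cooked", "dried", "ground", "fresh", "frozen", "canned", "whole", "powdered"] from by decide] at h2
      simp only [List.mem_cons, List.not_mem_nil, or_false] at h2
      rcases h2 with rfl|rfl|rfl|rfl|rfl|rfl|rfl|rfl|rfl <;>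
        simp_all [catTable, COLOR_WORDS, PySem.Set.ofList] <;> decide
    · by_cases h3 : t ∈ PREP_WORDS
      · rw [show PREP_WORDS = ["chopped", "diced", "minced", "sliced", "shredded", "peeled", "seeded", "grated", "crushed", "roasted", "toasted", "smoked", "blanched", "sauteed", "melted", "softened", "julienned", "cubed", "mashed", "pureed"] from by decide] at h3
        simp only [List.mem_cons, List.not_mem_nil, or_false] at h3
        rcases h3 with rfl|rfl|rfl|rfl|rfl|rfl|rfl|rfl|rfl|rfl|rfl|rfl|rfl|rfl|rfl|rfl|rfl|rfl|rfl|rfl <;>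
          simp_all [catTable, COLOR_WORDS, FORM_WORDS, PySem.Set.ofList] <;> decide
      · by_cases h4 : t ∈ SIZE_WORDS
        · rw [show SIZE_WORDS = ["small", "medium", "large", "thin", "thick", "baby", "mini"] from by decide] at h4
          simp only [List.mem_cons, List.not_mem_nil, or_false] at h4
          rcases h4 with rfl|rfl|rfl|rfl|rfl|rfl|rfl <;>
            simp_all [catTable, COLOR_WORDS, FORM_WORDS, PREP_WORDS, PySem.Set.ofList] <;> decide
        · rw [if_neg h1, if_neg h2, if_neg h3, if_neg h4,
             PySem.Dict.get?_eq_none_iff_not_mem_keys]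
          simp_all [catTable, COLOR_WORDS, FORM_WORDS, PREP_WORDS, SIZE_WORDS,
                    PySem.Set.ofList, eq_comm]

-- the four word sets are pairwise disjoint
theorem color_disj (t : String) (h : t ∈ COLOR_WORDS) :
    t ∉ FORM_WORDS ∧ t ∉ PREP_WORDS ∧ t ∉ SIZE_WORDS := by
  simp [COLOR_WORDS, PySem.Set.ofList] at h
  rcases h with rfl|rfl|rfl|rfl|rfl|rfl|rfl|rfl|rfl <;> decide

theorem form_disj (t : String) (h : t ∈ FORM_WORDS) :
    t ∉ PREP_WORDS ∧ t ∉ SIZE_WORDS := by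
  simp [FORM_WORDS, PySem.Set.ofList] at h
  rcases h with rfl|rfl|rfl|rfl|rfl|rfl|rfl|rfl|rfl <;> decide

theorem prep_disj (t : String) (h : t ∈ PREP_WORDS) : t ∉ SIZE_WORDS := by
  simp [PREP_WORDS, PySem.Set.ofList] at h
  rcases h with rfl|rfl|rfl|rfl|rfl|rfl|rfl|rfl|rfl|rfl|rfl|rfl|rfl|rfl|rfl|rfl|rfl|rfl|rfl|rfl <;> decide

-- modify on the fixed five-bucket dict rewrites the matching bucket
theorem modC (c f p s : List String) (g : List String → List String) :
    (PySem.Dict.mk [("color", c), ("form", f), ("prep", p), ("size", s), ("origin", ([] : List String))]).modify "color" [] g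
    = PySem.Dict.mk [("color", g c), ("form", f), ("prep", p), ("size", s), ("origin", [])] := rfl

theorem modF (c f p s : List String) (g : List String → List String) :
    (PySem.Dict.mk [("color", c), ("form", f), ("prep", p), ("size", s), ("origin", ([] : List String))]).modify "form" [] g
    = PySem.Dict.mk [("color", c), ("form", g f), ("prep", p), ("size", s), ("origin", [])] := rfl

theorem modP (c f p s : List String) (g : List String → List String) :
    (PySem.Dict.mk [("color", c), ("form", f), ("prep", p), ("size", s), ("origin", ([] : List String))]).modify "prep" [] g
    = PySem.Dict.mk [("color", c), ("form", f), ("prep", g p), ("size", s), ("origin", [])] := rfl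

theorem modS (c f p s : List String) (g : List String → List String) :
    (PySem.Dict.mk [("color", c), ("form", f), ("prep", p), ("size", s), ("origin", ([] : List String))]).modify "size" [] g
    = PySem.Dict.mk [("color", c), ("form", f), ("prep", p), ("size", g s), ("origin", [])] := rfl

-- loop invariant: B's fold keeps the five buckets equal to A's filters of the consumed prefix
theorem main_inv (ts : List String) (c f p s : List String) :
    (ts.foldl
      (fun r t =>
        match catTable.get? t with
        | some cat => r.modify cat [] (fun l => l ++ [t])
        | none => r)
      (PySem.Dict.mk [("color", c), ("form", f), ("prep", p), ("size", s), ("origin", ([] : List String))])) =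
    PySem.Dict.mk
      [("color", c ++ ts.filter (fun t => PySem.Set.contains COLOR_WORDS t)),
       ("form",  f ++ ts.filter (fun t => PySem.Set.contains FORM_WORDS t)),
       ("prep",  p ++ ts.filter (fun t => PySem.Set.contains PREP_WORDS t)),
       ("size",  s ++ ts.filter (fun t => PySem.Set.contains SIZE_WORDS t)),
       ("origin", [])] := by
  induction ts generalizing c f p s with
  | nil => simp
  | cons t ts ih =>
    simp only [List.foldl_cons, cat_lookup t]
    by_cases h1 : t ∈ COLOR_WORDS
    · obtain ⟨n2, n3, n4⟩ := color_disj t h1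
      simp only [if_pos h1, modC, ih]
      simp [h1, n2, n3, n4]
    · by_cases h2 : t ∈ FORM_WORDS
      · obtain ⟨n3, n4⟩ := form_disj t h2
        simp only [if_neg h1, if_pos h2, modF, ih]
        simp [h1, h2, n3, n4]
      · by_cases h3 : t ∈ PREP_WORDS
        · have n4 := prep_disj t h3
          simp only [if_neg h1, if_neg h2, if_pos h3, modP, ih]
          simp [h1, h2, h3, n4]
        · by_cases h4 : t ∈ SIZE_WORDS
          · simp only [if_neg h1, if_neg h2, if_neg h3, if_pos h4, modS, ih]
            simp [h1, h2, h3, h4]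
          · simp only [if_neg h1, if_neg h2, if_neg h3, if_neg h4, ih]
            simp [h1, h2, h3, h4]

-- ===== VERDICT (by name: the statement is the Claim_ definition above) =====
theorem derive_modifiers_spec : Claim_equal_derive_modifiers := by
  intro tokens _
  unfold Spec_derive_modifiers derive_modifiers derive_modifiers_alt
  rw [main_inv]
  simp
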